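-- pv_equiv track=rewrite | github.com/RuthraVed/hackerearth-practice-solutions | structy-practice-solutions/99-evenPairs.py | EvenPairs
-- ===== SOURCE A (Python) =====
-- def EvenPairs(strParam):
--
--     str_len = len(strParam)
--     index = 0
--
--     while index < str_len:
--         digits = ''
--         count = 0
--
--         for j in range(index, str_len):
--             #Checking if digit or not
--             if strParam[j].isdigit():
--                 digits+=strParam[j]
--                 if int(digits)%2==0:
--                     count+=1
--             else:
--                 index=j
--                 #To avoid going till end each time
--                 break
--             #Since else-control will not be explored
--             #Thus, for when string ends with digit
--             if j == str_len-1: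
--                 index=j
--
--             if count>=2:
--                 return True
--
--         #Whatever be case, base increment will happen
--         index+=1
--     return False
-- ===== SOURCE B (Python) =====
-- def EvenPairs(strParam):
--     # Single linear scan: count even digits in the current consecutive-digit run,
--     # resetting on any non-digit; True as soon as a run holds two even digits.
--     count = 0
--     for c in strParam:
--         if c.isdigit():
--             if ord(c) % 2 == 0:
--                 count += 1
--                 if count == 2:
--                     return True
--         else:
--             count = 0
--     return False
-- ===== Notes on version B (the rewrite author's own statement) =====
-- stated objective: faster
-- what changed: Replaced A's restart-and-rescan loop, which rebuilds the digit string and calls int() on the whole prefix at every step, with a single left-to-right pass that keeps one counter of even digits in the current consecutive-digit run (reset on non-digits, early True at two).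
import Mathlib
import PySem

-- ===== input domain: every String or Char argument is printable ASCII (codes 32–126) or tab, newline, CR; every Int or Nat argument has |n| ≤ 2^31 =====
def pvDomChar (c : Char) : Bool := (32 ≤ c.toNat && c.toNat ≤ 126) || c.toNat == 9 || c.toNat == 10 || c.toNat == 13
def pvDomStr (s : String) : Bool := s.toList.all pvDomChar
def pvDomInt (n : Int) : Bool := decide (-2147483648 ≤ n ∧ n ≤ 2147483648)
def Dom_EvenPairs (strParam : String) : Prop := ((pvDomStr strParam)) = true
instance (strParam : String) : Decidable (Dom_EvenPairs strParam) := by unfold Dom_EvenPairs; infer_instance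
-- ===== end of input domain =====

-- B replaces A's restart-and-rescan loop (which rebuilds the digit string and calls int()
-- on it at every step) by one linear scan counting even digits per consecutive-digit run.

-- ===== PORT A =====

-- int(digits) in A: `digits` is always a nonempty run of ASCII '0'-'9' (no sign, space or
-- underscore), on which Python's int() is exactly this decimal fold.
def pvDigitsInt (d : List Char) : Int :=
  d.foldl (fun a c => a * 10 + ((c.toNat : Int) - 48)) 0

-- the inner `for j in range(index, str_len)` loop of A: `none` = `return True`,
-- `some idx` = the value of `index` when the for-loop breaks or ends.
-- `fuel` only makes the recursion structural; calls supply fuel ≥ str_len - j,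
-- so the `fuel = 0` case coincides with the range being exhausted (j ≥ str_len).
def pvInnerA (cs : List Char) (n : Nat) (fuel : Nat) (digits : List Char) (count : Int)
    (index j : Nat) : Option Nat :=
  match fuel with
  | 0 => some index
  | fuel + 1 =>
    if j < n then
      let c := cs.getD j ' '
      if PySem.Chars.isdigit c then
        let digits' := digits ++ [c]
        let count' := if PySem.Int.mod (pvDigitsInt digits') 2 == 0 then count + 1 else count
        let index' := if j == n - 1 then j else index
        if count' ≥ 2 then none
        else pvInnerA cs n fuel digits' count' index' (j + 1)
      else some j
    else some index

-- the outer `while index < str_len` loop of A; index grows by at least 1 per iteration,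
-- so fuel = str_len covers every iteration and the `fuel = 0` case coincides with index ≥ str_len
def pvOuterA (cs : List Char) (n : Nat) (fuel index : Nat) : Bool :=
  match fuel with
  | 0 => false
  | fuel + 1 =>
    if index < n then
      match pvInnerA cs n (n - index) [] 0 index index with
      | none => true
      | some idx => pvOuterA cs n fuel (idx + 1)
    else false

def EvenPairs (strParam : String) : Bool :=
  pvOuterA strParam.toList strParam.toList.length strParam.toList.length 0

-- ===== PORT B =====

-- B's single pass: `count` = even digits seen in the current consecutive-digit run
def pvScanB (cs : List Char) (count : Int) : Bool :=
  match cs with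
  | [] => false
  | c :: rest =>
    if PySem.Chars.isdigit c then
      if PySem.Int.mod (c.toNat : Int) 2 == 0 then
        if count + 1 == 2 then true else pvScanB rest (count + 1)
      else pvScanB rest count
    else pvScanB rest 0

def EvenPairs_alt (strParam : String) : Bool :=
  pvScanB strParam.toList 0

-- ===== PRECONDITION & SPEC =====
def Spec_EvenPairs (strParam : String) (out : Bool) : Prop := out = EvenPairs_alt strParam
instance (strParam : String) (out : Bool) : Decidable (Spec_EvenPairs strParam out) := by unfold Spec_EvenPairs; infer_instance

-- ===== CLAIM (what is proved, stated in full; the proofs are below) =====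
def Claim_equal_EvenPairs : Prop := ∀ (strParam : String), Dom_EvenPairs strParam → Spec_EvenPairs strParam (EvenPairs strParam)

-- ===== LEMMAS AND PROOFS =====

-- parity of int(digits ++ [c]) is the parity of the last digit c
theorem pvDigitsInt_append_parity (d : List Char) (c : Char) :
    (PySem.Int.mod (pvDigitsInt (d ++ [c])) 2 == 0) =
      (PySem.Int.mod ((c.toNat : Int)) 2 == 0) := by
  have h1 : pvDigitsInt (d ++ [c]) = pvDigitsInt d * 10 + ((c.toNat : Int) - 48) := by
    simp [pvDigitsInt, List.foldl_append]
  rw [h1, PySem.Int.mod_eq_emod_of_pos (by norm_num : (0:Int) < 2),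
      PySem.Int.mod_eq_emod_of_pos (by norm_num : (0:Int) < 2)]
  have h2 : (pvDigitsInt d * 10 + ((c.toNat : Int) - 48)) % 2 = (c.toNat : Int) % 2 := by omega
  rw [h2]

-- the inner loop never returns an index below `min index j`
theorem pvInnerA_some_ge (cs : List Char) (n fuel : Nat) (digits : List Char) (count : Int)
    (index j idx : Nat) (h : pvInnerA cs n fuel digits count index j = some idx) :
    min index j ≤ idx := by
  fun_induction pvInnerA cs n fuel digits count index j with
  | case1 digits count index j =>
      simp only [Option.some.injEq] at h; omega
  | case2 digits count index j fuel hj c hdig digits' count' hge => simp at h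
  | case3 digits count index j fuel hj c hdig digits' count' index' hge ih =>
      have h2 := ih h
      have h3 : min index j ≤ index' := by
        simp only [index']; split <;> omega
      omega
  | case4 digits count index j fuel hj c hdig =>
      simp only [Option.some.injEq] at h; omega
  | case5 digits count index j fuel hj =>
      simp only [Option.some.injEq] at h; omega

-- one step of B's scan on a cons cell
theorem pvScanB_cons (c : Char) (rest : List Char) (count : Int) :
    pvScanB (c :: rest) count =
      if PySem.Chars.isdigit c then
        if PySem.Int.mod (c.toNat : Int) 2 == 0 then
          if count + 1 == 2 then true else pvScanB rest (count + 1)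
        else pvScanB rest count
      else pvScanB rest 0 := rfl

-- the inner loop of A against B's scan over the same suffix
theorem pvInnerA_scanB (cs : List Char) (fuel : Nat) (digits : List Char) (count : Int)
    (index j : Nat) :
    cs.length ≤ fuel + j → (j < cs.length ∨ index + 1 = cs.length) →
    0 ≤ count → count ≤ 1 →
    (match pvInnerA cs cs.length fuel digits count index j with
     | none => pvScanB (cs.drop j) count = true
     | some idx => pvScanB (cs.drop j) count = pvScanB (cs.drop (idx + 1)) 0) := by
  fun_induction pvInnerA cs cs.length fuel digits count index j with
  | case1 digits count index j =>
      intro hf hji h0 h1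
      show pvScanB (cs.drop j) count = pvScanB (cs.drop (index + 1)) 0
      have hn : index + 1 = cs.length := by omega
      rw [List.drop_eq_nil_of_le (by omega), List.drop_eq_nil_of_le (by omega)]
      rfl
  | case3 digits count index j fuel hj c hdig digits' count' index' hge ih =>
      intro hf hji h0 h1
      -- one digit step: A's count' matches B's next count, then apply the IH at j+1
      have hpar : (PySem.Int.mod (pvDigitsInt digits') 2 == 0)
                = (PySem.Int.mod ((c.toNat : Int)) 2 == 0) := by
        simp only [digits']; exact pvDigitsInt_append_parity digits c
      have h0' : 0 ≤ count' := by
        simp only [count']; split <;> omega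
      have h1' : count' ≤ 1 := by
        simp only [count'] at hge ⊢; omega
      have hji' : j + 1 < cs.length ∨ index' + 1 = cs.length := by
        simp only [index']; split
        · next hlast => simp only [beq_iff_eq] at hlast; omega
        · next hlast => simp only [beq_iff_eq] at hlast; omega
      have hcel : c = cs[j] := List.getD_eq_getElem cs ' ' hj
      have hstep : pvScanB (cs.drop j) count = pvScanB (cs.drop (j + 1)) count' := by
        rw [List.drop_eq_getElem_cons hj, ← hcel, pvScanB_cons, if_pos hdig]
        by_cases hev : (PySem.Int.mod ((c.toNat : Int)) 2 == 0) = true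
        · have hcv : count' = count + 1 := by
            simp only [count']; rw [if_pos (by rw [hpar]; exact hev)]
          have hlt : count' < 2 := by omega
          rw [if_pos hev,
              if_neg (show ¬ (count + 1 == 2) = true by rw [beq_iff_eq]; omega), hcv]
        · have hcv : count' = count := by
            simp only [count']; rw [if_neg (by rw [hpar]; exact hev)]
          rw [if_neg hev, hcv]
      rw [hstep]
      exact ih (by omega) hji' h0' h1'
  | case2 digits count index j fuel hj c hdig digits' count' hge =>
      intro hf hji h0 h1
      -- the inner loop returns True: count' ≥ 2 forces an increment, so c is even and count = 1
      have hpar : (PySem.Int.mod (pvDigitsInt digits') 2 == 0)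
                = (PySem.Int.mod ((c.toNat : Int)) 2 == 0) := by
        simp only [digits']; exact pvDigitsInt_append_parity digits c
      have heven : (PySem.Int.mod ((c.toNat : Int)) 2 == 0) = true := by
        by_contra hne
        rw [show count' = count from by
              simp only [count']; rw [if_neg (by rw [hpar]; exact hne)]] at hge
        omega
      have hcnt : count = 1 := by
        rw [show count' = count + 1 from by
              simp only [count']; rw [if_pos (by rw [hpar]; exact heven)]] at hge
        omega
      have hcel : c = cs[j] := List.getD_eq_getElem cs ' ' hj
      show pvScanB (cs.drop j) count = true
      rw [List.drop_eq_getElem_cons hj, ← hcel, pvScanB_cons, if_pos hdig, if_pos heven,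
          if_pos (show (count + 1 == 2) = true by rw [beq_iff_eq]; omega)]
  | case4 digits count index j fuel hj c hdig =>
      intro hf hji h0 h1
      -- break at a non-digit: B resets its counter there
      have hcel : c = cs[j] := List.getD_eq_getElem cs ' ' hj
      show pvScanB (cs.drop j) count = pvScanB (cs.drop (j + 1)) 0
      rw [List.drop_eq_getElem_cons hj, ← hcel, pvScanB_cons, if_neg hdig]
  | case5 digits count index j fuel hj =>
      intro hf hji h0 h1
      show pvScanB (cs.drop j) count = pvScanB (cs.drop (index + 1)) 0
      have hn : index + 1 = cs.length := by omega
      rw [List.drop_eq_nil_of_le (by omega), List.drop_eq_nil_of_le (by omega)]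
      rfl

-- the outer loop of A computes B's scan of the remaining suffix
theorem pvOuterA_scanB (cs : List Char) (fuel index : Nat) (hf : cs.length ≤ fuel + index) :
    pvOuterA cs cs.length fuel index = pvScanB (cs.drop index) 0 := by
  fun_induction pvOuterA cs cs.length fuel index with
  | case1 index =>
      rw [List.drop_eq_nil_of_le (by omega)]
      rfl
  | case2 index fuel hlt hi =>
      have h := pvInnerA_scanB cs (cs.length - index) [] 0 index index
        (by omega) (Or.inl hlt) le_rfl (by norm_num)
      rw [hi] at h
      exact h.symm
  | case3 index fuel hlt idx hi ih =>
      have h := pvInnerA_scanB cs (cs.length - index) [] 0 index index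
        (by omega) (Or.inl hlt) le_rfl (by norm_num)
      rw [hi] at h
      have hge := pvInnerA_some_ge cs cs.length (cs.length - index) [] 0 index index idx hi
      rw [ih (by omega)]
      exact h.symm
  | case4 index fuel hge =>
      rw [List.drop_eq_nil_of_le (by omega)]
      rfl

-- ===== VERDICT (by name: the statement is the Claim_ definition above) =====
theorem EvenPairs_spec : Claim_equal_EvenPairs := by
  intro s _
  unfold Spec_EvenPairs EvenPairs EvenPairs_alt
  exact pvOuterA_scanB s.toList s.toList.length 0 (by omega)
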